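-- pv_equiv track=rewrite | github.com/lookitsssonya/ZhuravlevaSV | lab_11/src/z_function.py | find_period_using_z
-- ===== SOURCE A (Python) =====
-- from typing import List
--
-- def compute_z_function(text: str) -> List[int]:
--     """Вычисляет Z-функцию для строки.
--
--     Args:
--         text: Входная строка
--
--     Returns:
--         Список значений Z-функции
--     """
--     n = len(text)
--     if n == 0:
--         return []
--
--     z = [0] * n
--     left = 0
--     right = 0
--
--     for i in range(1, n):
--         if i <= right:
--             z[i] = min(right - i + 1, z[i - left])
--
--         while i + z[i] < n and text[z[i]] == text[i + z[i]]:
--             z[i] += 1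
--
--         if i + z[i] - 1 > right:
--             left = i
--             right = i + z[i] - 1
--
--     return z
--
-- def find_period_using_z(text: str) -> int:
--     """Находит период строки с использованием Z-функции.
--
--     Args:
--         text: Входная строка
--
--     Returns:
--         Длина периода строки
--     """
--     n = len(text)
--     if n == 0:
--         return 0
--
--     z = compute_z_function(text)
--
--     for i in range(1, n):
--         if i + z[i] == n and n % i == 0:
--             return i
--
--     return n
-- ===== SOURCE B (Python) =====
-- def find_period_using_z(text: str) -> int:
--     """Smallest period length: the least divisor i of n with text[i:] == text[:n-i]."""
--     n = len(text)
--     for i in range(1, n):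
--         if n % i == 0 and text[i:] == text[:n - i]:
--             return i
--     return n
-- ===== Notes on version B (the rewrite author's own statement) =====
-- stated objective: simpler
-- what changed: Drops the Z-array (two-pointer window, trailing scan) entirely: B directly returns the smallest divisor i of n whose suffix text[i:] equals the prefix text[:n-i], by one loop of slice comparisons.
import Mathlib
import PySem

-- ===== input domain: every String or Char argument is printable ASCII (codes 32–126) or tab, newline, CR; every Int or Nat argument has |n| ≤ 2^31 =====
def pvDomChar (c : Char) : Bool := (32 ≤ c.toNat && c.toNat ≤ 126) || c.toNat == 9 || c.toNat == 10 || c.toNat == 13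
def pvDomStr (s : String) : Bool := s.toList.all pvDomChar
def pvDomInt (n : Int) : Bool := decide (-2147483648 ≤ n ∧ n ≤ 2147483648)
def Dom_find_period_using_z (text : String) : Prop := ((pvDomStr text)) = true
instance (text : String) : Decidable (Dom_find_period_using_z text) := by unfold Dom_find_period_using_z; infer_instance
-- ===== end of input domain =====

-- B replaces the Z-array computation and trailing scan by a direct search for the smallest
-- divisor i of n with text[i:] == text[:n-i] (objective: simpler; a timing run measured it faster on random inputs: n%i short-circuits most indices and slice comparison runs in C, vs A's per-character Z loop).

-- ===== PORT A =====
-- the inner `while` of compute_z_function: extend the match count v while text[v] == text[i+v].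
-- (Python indexes text[v] and text[i+v]; both are in range whenever the guard's first
-- conjunct holds in actual executions with 1 ≤ i, so getD is exact there.)
def zExtend (cs : List Char) (i : Nat) (v : Nat) : Nat :=
  if i + v < cs.length ∧ cs.getD v ' ' = cs.getD (i + v) ' ' then
    zExtend cs i (v + 1)
  else v
termination_by cs.length - (i + v)
decreasing_by omega

-- the `for i in range(1, n)` loop of compute_z_function, state (z, left, right)
def zLoop (cs : List Char) (i : Nat) (z : List Nat) (left right : Nat) : List Nat :=
  if i < cs.length then
    let v0 := if i ≤ right then min (right - i + 1) (z.getD (i - left) 0) else z.getD i 0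
    let v := zExtend cs i v0
    let z' := z.set i v
    if right < i + v - 1 then zLoop cs (i + 1) z' i (i + v - 1)
    else zLoop cs (i + 1) z' left right
  else z
termination_by cs.length - i

def compute_z_function (cs : List Char) : List Nat :=
  if cs.length = 0 then []
  else zLoop cs 1 (List.replicate cs.length 0) 0 0

-- the final `for i in range(1, n)` loop of find_period_using_z
def scanA (z : List Nat) (n : Nat) (i : Nat) : Int :=
  if i < n then
    if i + z.getD i 0 = n ∧ n % i = 0 then (i : Int) else scanA z n (i + 1)
  else (n : Int)
termination_by n - i

def find_period_using_z (text : String) : Int :=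
  let cs := text.toList
  if cs.length = 0 then 0
  else scanA (compute_z_function cs) cs.length 1

-- ===== PORT B =====
-- Source B's single loop: first i in range(1, n) with n % i == 0 and text[i:] == text[:n-i], else n
def altLoop (cs : List Char) (i : Nat) : Int :=
  if i < cs.length then
    if cs.length % i = 0 ∧ cs.drop i = cs.take (cs.length - i) then (i : Int)
    else altLoop cs (i + 1)
  else (cs.length : Int)
termination_by cs.length - i

def find_period_using_z_alt (text : String) : Int :=
  altLoop text.toList 1

-- ===== PRECONDITION & SPEC =====
def Spec_find_period_using_z (text : String) (out : Int) : Prop := out = find_period_using_z_alt text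
instance (text : String) (out : Int) : Decidable (Spec_find_period_using_z text out) := by unfold Spec_find_period_using_z; infer_instance

-- ===== CLAIM (what is proved, stated in full; the proofs are below) =====
def Claim_equal_find_period_using_z : Prop := ∀ (text : String), Dom_find_period_using_z text → Spec_find_period_using_z text (find_period_using_z text)

-- ===== LEMMAS AND PROOFS =====

-- longest common prefix length of two lists
def lcp : List Char → List Char → Nat
  | a :: as, b :: bs => if a = b then lcp as bs + 1 else 0
  | _, _ => 0

theorem lcp_cons (x y : Char) (as bs : List Char) :
    lcp (x :: as) (y :: bs) = if x = y then lcp as bs + 1 else 0 := rfl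

theorem lcp_le_right : ∀ (a b : List Char), lcp a b ≤ b.length := by
  intro a b
  induction a generalizing b with
  | nil => cases b <;> simp [lcp]
  | cons x as ih =>
    cases b with
    | nil => simp [lcp]
    | cons y bs =>
      simp only [lcp, List.length_cons]
      split
      · have := ih bs; omega
      · omega

theorem lcp_get : ∀ (a b : List Char) (j : Nat) (d : Char), j < lcp a b →
    a.getD j d = b.getD j d := by
  intro a
  induction a with
  | nil => intro b j d h; cases b <;> simp [lcp] at h
  | cons x as ih =>
    intro b j d h
    cases b with
    | nil => simp [lcp] at h
    | cons y bs =>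
      simp only [lcp] at h
      split at h
      · cases j with
        | zero => simpa using ‹x = y›
        | succ j' =>
          simp only [List.getD_cons_succ]
          exact ih bs j' d (by omega)
      · omega

theorem lcp_stop : ∀ (a b : List Char) (d : Char), lcp a b < a.length → lcp a b < b.length →
    a.getD (lcp a b) d ≠ b.getD (lcp a b) d := by
  intro a
  induction a with
  | nil => intro b d h _; simp at h
  | cons x as ih =>
    intro b d h1 h2
    cases b with
    | nil => simp at h2
    | cons y bs =>
      by_cases hxy : x = y
      · subst hxy
        rw [lcp_cons, if_pos rfl] at h1 h2 ⊢
        simp only [List.getD_cons_succ]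
        exact ih bs d (by simpa using h1) (by simpa using h2)
      · rw [lcp_cons, if_neg hxy]
        simpa using hxy

theorem lcp_ge : ∀ (a b : List Char) (m : Nat) (d : Char),
    (∀ j, j < m → a.getD j d = b.getD j d) → m ≤ a.length → m ≤ b.length → m ≤ lcp a b := by
  intro a
  induction a with
  | nil =>
    intro b m d _ h _
    have hm0 : m = 0 := by simpa using h
    exact hm0 ▸ Nat.zero_le _
  | cons x as ih =>
    intro b m d hm ha hb
    cases b with
    | nil => simp at hb; omega
    | cons y bs =>
      cases m with
      | zero => omega
      | succ m' =>
        have hxy : x = y := by simpa using hm 0 (by omega)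
        simp only [lcp, if_pos hxy]
        have : m' ≤ lcp as bs := by
          apply ih bs m' d
          · intro j hj
            have := hm (j + 1) (by omega)
            simpa using this
          · simpa using ha
          · simpa using hb
        omega

-- getD of a drop, for in-range indices
theorem getD_drop (cs : List Char) (i j : Nat) (d : Char) :
    (cs.drop i).getD j d = cs.getD (i + j) d := by
  rw [List.getD_eq_getElem?_getD, List.getD_eq_getElem?_getD, List.getElem?_drop]

theorem getD_set_self (l : List Nat) (i v : Nat) (h : i < l.length) :
    (l.set i v).getD i 0 = v := by
  rw [List.getD_eq_getElem?_getD, List.getElem?_set_self (by omega)]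
  simp

theorem getD_set_ne (l : List Nat) (i k v : Nat) (h : k ≠ i) :
    (l.set i v).getD k 0 = l.getD k 0 := by
  rw [List.getD_eq_getElem?_getD, List.getElem?_set_ne (by omega), ← List.getD_eq_getElem?_getD]

theorem lcp_eq_len_iff : ∀ (a b : List Char), b.length ≤ a.length →
    (lcp a b = b.length ↔ b = a.take b.length) := by
  intro a
  induction a with
  | nil =>
    intro b h
    have : b = [] := by cases b <;> simp_all
    subst this; simp [lcp]
  | cons x as ih =>
    intro b h
    cases b with
    | nil => simp [lcp]
    | cons y bs =>
      rw [lcp_cons]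
      simp only [List.length_cons, List.take_succ_cons, List.cons.injEq]
      by_cases hxy : x = y
      · subst hxy
        rw [if_pos rfl]
        have hb : bs.length ≤ as.length := by simpa using h
        constructor
        · intro he
          exact ⟨rfl, (ih bs hb).mp (by omega)⟩
        · intro ⟨_, he⟩
          have := (ih bs hb).mpr he
          omega
      · rw [if_neg hxy]
        constructor
        · intro he; omega
        · intro ⟨he, _⟩; exact absurd he.symm hxy

-- the while loop computes exactly lcp cs (cs.drop i), from any valid start v ≤ lcp
theorem zExtend_eq_lcp (cs : List Char) (i : Nat) (hi : 1 ≤ i) :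
    ∀ (v : Nat), v ≤ lcp cs (cs.drop i) → zExtend cs i v = lcp cs (cs.drop i) := by
  set n := cs.length with hn
  set L := lcp cs (cs.drop i) with hL
  have hLn : L ≤ n - i := by
    have := lcp_le_right cs (cs.drop i)
    simpa [List.length_drop] using this
  have key : ∀ (k v : Nat), L - v = k → v ≤ L → zExtend cs i v = L := by
    intro k
    induction k with
    | zero =>
      intro v hk hv
      have hvL : v = L := by omega
      subst hvL
      rw [zExtend, if_neg]
      rintro ⟨h1, h2⟩
      have hd1 : L < cs.length := by omega
      have hd2 : L < (cs.drop i).length := by simp only [List.length_drop]; omega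
      have hs := lcp_stop cs (cs.drop i) ' ' hd1 hd2
      rw [getD_drop cs i L ' '] at hs
      exact hs (by rw [← hL]; exact h2)
    | succ k' ih =>
      intro v hk hv
      have hvL : v < L := by omega
      rw [zExtend, if_pos]
      · exact ih (v + 1) (by omega) (by omega)
      · refine ⟨by omega, ?_⟩
        have hg := lcp_get cs (cs.drop i) v ' ' (by omega)
        rw [getD_drop cs i v ' '] at hg
        exact hg
  intro v hv
  exact key (L - v) v rfl hv

-- invariant of the main loop: once it finishes, every index 1 ≤ k < n carries lcp cs (cs.drop k)
theorem zLoop_spec (cs : List Char) :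
    ∀ (fuel i : Nat) (z : List Nat) (left right : Nat),
    cs.length - i ≤ fuel →
    1 ≤ i →
    z.length = cs.length →
    (∀ k, k < i → z.getD k 0 = if k = 0 then 0 else lcp cs (cs.drop k)) →
    (∀ k, i ≤ k → z.getD k 0 = 0) →
    left ≤ i → left ≤ right + 1 →
    (right < i ∨ 1 ≤ left) →
    (1 ≤ left → right + 1 - left ≤ lcp cs (cs.drop left)) →
    ∀ k, 1 ≤ k → k < cs.length →
      (zLoop cs i z left right).getD k 0 = lcp cs (cs.drop k) := by
  intro fuel
  induction fuel with
  | zero =>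
    intro i z left right hfuel hi hz hdone hrest _ _ _ _ k hk1 hk2
    rw [zLoop, if_neg (by omega)]
    rw [hdone k (by omega), if_neg (by omega)]
  | succ f ih =>
    intro i z left right hfuel hi hz hdone hrest hli hlr hcase hwin k hk1 hk2
    by_cases hin : i < cs.length
    swap
    · rw [zLoop, if_neg hin]
      rw [hdone k (by omega), if_neg (by omega)]
    rw [zLoop, if_pos hin]
    simp only
    set L := lcp cs (cs.drop i) with hL
    have hLn : L ≤ cs.length - i := by
      have := lcp_le_right cs (cs.drop i); simpa [List.length_drop] using this
    -- the initial value of z[i] is a valid lower bound for L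
    have hv0 : (if i ≤ right then min (right - i + 1) (z.getD (i - left) 0)
                else z.getD i 0) ≤ L := by
      split
      case isFalse => rw [hrest i (by omega)]; omega
      case isTrue hir =>
        have hl1 : 1 ≤ left := by omega
        by_cases hleq : left = i
        · rw [hleq, Nat.sub_self, hdone 0 (by omega), if_pos rfl]; omega
        · have hlti : left < i := by omega
          have hwin' := hwin hl1
          rw [hdone (i - left) (by omega), if_neg (by omega)]
          set m := min (right - i + 1) (lcp cs (cs.drop (i - left))) with hm
          have hrn : right + 1 ≤ cs.length := by
            have h1 := lcp_le_right cs (cs.drop left)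
            simp only [List.length_drop] at h1
            omega
          apply lcp_ge cs (cs.drop i) m ' '
          · intro j hj
            rw [getD_drop cs i j ' ']
            have e1 : cs.getD j ' ' = (cs.drop (i - left)).getD j ' ' :=
              lcp_get cs (cs.drop (i - left)) j ' ' (by omega)
            rw [getD_drop cs (i - left) j ' '] at e1
            have e2 : cs.getD ((i - left) + j) ' ' = cs.getD (i + j) ' ' := by
              have t2 : cs.getD ((i - left) + j) ' ' = (cs.drop left).getD ((i - left) + j) ' ' :=
                lcp_get cs (cs.drop left) ((i - left) + j) ' ' (by omega)
              rw [t2, getD_drop cs left ((i - left) + j) ' ']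
              congr 1
              omega
            rw [e1, e2]
          · omega
          · simp only [List.length_drop]; omega
    have hv : zExtend cs i (if i ≤ right then min (right - i + 1) (z.getD (i - left) 0)
                else z.getD i 0) = L := zExtend_eq_lcp cs i hi _ hv0
    rw [hv]
    -- facts about the updated z-array
    have hz'len : (z.set i L).length = cs.length := by simpa using hz
    have hdone' : ∀ k', k' < i + 1 → (z.set i L).getD k' 0 =
        if k' = 0 then 0 else lcp cs (cs.drop k') := by
      intro k' hk'
      by_cases he : k' = i
      · subst he
        rw [getD_set_self z k' L (by omega), if_neg (by omega), hL]
      · rw [getD_set_ne z i k' L he]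
        exact hdone k' (by omega)
    have hrest' : ∀ k', i + 1 ≤ k' → (z.set i L).getD k' 0 = 0 := by
      intro k' hk'
      rw [getD_set_ne z i k' L (by omega)]
      exact hrest k' (by omega)
    split
    · apply ih (i + 1) (z.set i L) i (i + L - 1) (by omega) (by omega) hz'len hdone' hrest'
          (by omega) (by omega) (by omega) ?_ k hk1 hk2
      intro _
      rw [← hL]
      omega
    · apply ih (i + 1) (z.set i L) left right (by omega) (by omega) hz'len hdone' hrest'
          (by omega) (by omega) (by omega) hwin k hk1 hk2

-- the computed z-array carries exactly the lcp values
theorem compute_z_spec (cs : List Char) (k : Nat) (h1 : 1 ≤ k) (h2 : k < cs.length) :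
    (compute_z_function cs).getD k 0 = lcp cs (cs.drop k) := by
  rw [compute_z_function, if_neg (by omega)]
  apply zLoop_spec cs (cs.length - 1) 1 (List.replicate cs.length 0) 0 0
      (by omega) (by omega) (by simp)
      (by intro k' hk'; simp only [List.getD_eq_getElem?_getD]
          rw [List.getElem?_replicate]; split <;> simp_all)
      (by intro k' _; simp only [List.getD_eq_getElem?_getD]
          rw [List.getElem?_replicate]; split <;> simp)
      (by omega) (by omega) (by omega) (by omega) k h1 h2

-- A's scan condition equals B's slice condition once z[i] = lcp
theorem cond_equiv (cs : List Char) (i : Nat) (h1 : 1 ≤ i) (h2 : i < cs.length) :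
    (i + lcp cs (cs.drop i) = cs.length) ↔ cs.drop i = cs.take (cs.length - i) := by
  have hlen : (cs.drop i).length = cs.length - i := by simp
  have hle : (cs.drop i).length ≤ cs.length := by omega
  have := lcp_eq_len_iff cs (cs.drop i) hle
  rw [hlen] at this
  have hub := lcp_le_right cs (cs.drop i)
  rw [hlen] at hub
  constructor
  · intro h
    exact this.mp (by omega)
  · intro h
    have := this.mpr h
    omega

-- the two final loops agree pointwise
theorem scan_eq (cs : List Char) :
    ∀ (fuel i : Nat), cs.length - i ≤ fuel → 1 ≤ i →
      scanA (compute_z_function cs) cs.length i = altLoop cs i := by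
  intro fuel
  induction fuel with
  | zero =>
    intro i hf h1
    rw [scanA, if_neg (by omega), altLoop, if_neg (by omega)]
  | succ f ih =>
    intro i hf h1
    by_cases hin : i < cs.length
    swap
    · rw [scanA, if_neg hin, altLoop, if_neg hin]
    rw [scanA, if_pos hin, altLoop, if_pos hin]
    rw [compute_z_spec cs i h1 hin]
    have hc := cond_equiv cs i h1 hin
    by_cases hmod : cs.length % i = 0
    · by_cases hz : i + lcp cs (cs.drop i) = cs.length
      · rw [if_pos ⟨hz, hmod⟩, if_pos ⟨hmod, hc.mp hz⟩]
      · rw [if_neg (by tauto), if_neg (by rw [← hc] at *; tauto)]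
        exact ih (i + 1) (by omega) (by omega)
    · rw [if_neg (by tauto), if_neg (by tauto)]
      exact ih (i + 1) (by omega) (by omega)

-- ===== VERDICT (by name: the statement is the Claim_ definition above) =====
theorem find_period_using_z_spec : Claim_equal_find_period_using_z := by
  intro text _
  unfold Spec_find_period_using_z find_period_using_z find_period_using_z_alt
  simp only
  by_cases h0 : text.toList.length = 0
  · rw [if_pos h0, altLoop, if_neg (by omega)]
    rw [h0]
    rfl
  · rw [if_neg h0]
    exact scan_eq text.toList (text.toList.length - 1) 1 (by omega) (by omega)
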